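-- pv_equiv track=rewrite | github.com/megascienta/sciona | src/sciona/pipelines/exec/reporting_callsites.py | sum_bucket_counts
-- ===== SOURCE A (Python) =====
-- def sum_bucket_counts(
--     language_buckets: dict[str, dict[str, int]],
-- ) -> dict[str, int]:
--     totals: dict[str, int] = {}
--     for buckets in language_buckets.values():
--         for bucket, count in buckets.items():
--             totals[bucket] = totals.get(bucket, 0) + int(count)
--     return dict(sorted(totals.items()))
-- ===== SOURCE B (Python) =====
-- def sum_bucket_counts(
--     language_buckets: dict[str, dict[str, int]],
-- ) -> dict[str, int]:
--     pairs = [(bucket, int(count))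
--              for buckets in language_buckets.values()
--              for bucket, count in buckets.items()]
--     return {bucket: sum(c for b, c in pairs if b == bucket)
--             for bucket in sorted({b for b, _ in pairs})}
-- ===== Notes on version B (the rewrite author's own statement) =====
-- stated objective: simpler
-- what changed: Replaces the hash-accumulate-then-sort loop with a flat pair list, a sorted set of distinct bucket names, and one dict comprehension summing each bucket's counts directly.
import Mathlib
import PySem

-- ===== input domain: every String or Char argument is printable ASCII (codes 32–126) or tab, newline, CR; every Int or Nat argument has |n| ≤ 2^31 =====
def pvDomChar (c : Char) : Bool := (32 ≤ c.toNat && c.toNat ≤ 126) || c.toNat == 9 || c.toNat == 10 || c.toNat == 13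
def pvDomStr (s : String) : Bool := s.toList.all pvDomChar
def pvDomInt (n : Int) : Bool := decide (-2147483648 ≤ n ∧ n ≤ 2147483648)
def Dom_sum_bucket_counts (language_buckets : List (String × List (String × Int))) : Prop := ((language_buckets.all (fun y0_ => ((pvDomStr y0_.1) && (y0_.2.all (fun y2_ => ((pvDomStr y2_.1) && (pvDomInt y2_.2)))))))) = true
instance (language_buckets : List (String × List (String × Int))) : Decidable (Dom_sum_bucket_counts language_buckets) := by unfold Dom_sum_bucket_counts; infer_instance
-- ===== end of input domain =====

-- B replaces A's hash-accumulate-then-sort loop by a flat pair list, a sorted set of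
-- distinct bucket names, and a per-name summing comprehension (objective: simpler).
-- ===== PORT A =====
def sum_bucket_counts (language_buckets : List (String × List (String × Int))) : List (String × Int) :=
  let totals : PySem.Dict String Int :=
    language_buckets.foldl (fun totals buckets =>
      buckets.2.foldl (fun totals bc =>
        totals.insert bc.1 (totals.getD bc.1 0 + bc.2)) totals) PySem.Dict.empty
  -- sorted(totals.items()): Python's default tuple comparison = sorted2 on (fst, snd)
  PySem.List.sorted2 totals.items (fun p => p.1) (fun p => p.2)

-- ===== PORT B =====
def sum_bucket_counts_alt (language_buckets : List (String × List (String × Int))) : List (String × Int) :=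
  let pairs := language_buckets.flatMap (fun kv => kv.2)
  let names := PySem.List.sorted (PySem.Set.ofList (pairs.map (fun p => p.1))) (fun k => k)
  names.map (fun k => (k, ((pairs.filter (fun p => p.1 == k)).map (fun p => p.2)).sum))

-- ===== PRECONDITION & SPEC =====
def Spec_sum_bucket_counts (language_buckets : List (String × List (String × Int))) (out : List (String × Int)) : Prop := out = sum_bucket_counts_alt language_buckets
instance (language_buckets : List (String × List (String × Int))) (out : List (String × Int)) : Decidable (Spec_sum_bucket_counts language_buckets out) := by unfold Spec_sum_bucket_counts; infer_instance

-- ===== CLAIM (what is proved, stated in full; the proofs are below) =====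
def Claim_equal_sum_bucket_counts : Prop := ∀ (language_buckets : List (String × List (String × Int))), Dom_sum_bucket_counts language_buckets → Spec_sum_bucket_counts language_buckets (sum_bucket_counts language_buckets)

-- ===== LEMMAS AND PROOFS =====

-- A's nested accumulation loop is the flat accumulation loop over the flattened pair list.
theorem acc_flatten (language_buckets : List (String × List (String × Int)))
    (d : PySem.Dict String Int) :
    language_buckets.foldl (fun totals buckets =>
      buckets.2.foldl (fun totals bc =>
        totals.insert bc.1 (totals.getD bc.1 0 + bc.2)) totals) d
    = (language_buckets.flatMap (fun kv => kv.2)).foldl (fun totals bc =>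
        totals.insert bc.1 (totals.getD bc.1 0 + bc.2)) d := by
  induction language_buckets generalizing d with
  | nil => rfl
  | cons hd tl ih => simp [List.flatMap_cons, List.foldl_append, ih]

-- value of the accumulator dict at any key: the sum of that key's counts.
theorem getD_acc (ps : List (String × Int)) (d : PySem.Dict String Int) (k : String) :
    (ps.foldl (fun totals bc => totals.insert bc.1 (totals.getD bc.1 0 + bc.2)) d).getD k 0
    = d.getD k 0 + ((ps.filter (fun p => p.1 == k)).map (fun p => p.2)).sum := by
  induction ps generalizing d with
  | nil => simp
  | cons hd tl ih =>
    by_cases h : hd.1 = k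
    · subst h
      simp [ih, PySem.Dict.getD_insert_self]
      ring
    · simp [ih, PySem.Dict.getD_insert_of_ne _ _ _ (fun hk => h hk.symm),
        h]

-- insertBy only looks at 'before x y' for y in the list.
theorem insertBy_congr {α : Type} (p q : α → α → Bool) (x : α) :
    ∀ (ys : List α), (∀ y ∈ ys, p x y = q x y) →
      PySem.List.insertBy p x ys = PySem.List.insertBy q x ys := by
  intro ys
  induction ys with
  | nil => intro _; rfl
  | cons y ys ih =>
    intro h
    simp only [PySem.List.insertBy]
    rw [h y (by simp)]
    by_cases hb : q x y = true
    · simp [hb]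
    · simp [hb, ih (fun z hz => h z (by simp [hz]))]

-- the two insertion folds agree when p and q agree on all pairs drawn from acc ++ xs.
theorem foldl_insertBy_eq {α : Type} (p q : α → α → Bool) :
    ∀ (xs acc : List α), (∀ x ∈ xs, ∀ y, (y ∈ acc ∨ y ∈ xs) → p x y = q x y) →
      xs.foldl (fun acc x => PySem.List.insertBy p x acc) acc
      = xs.foldl (fun acc x => PySem.List.insertBy q x acc) acc := by
  intro xs
  induction xs with
  | nil => intro _ _; rfl
  | cons x t ih =>
    intro acc h
    simp only [List.foldl_cons]
    rw [insertBy_congr p q x acc (fun y hy => h x (by simp) y (Or.inl hy))]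
    apply ih
    intro z hz y hy
    refine h z (by simp [hz]) y ?_
    rcases hy with hy | hy
    · rcases (PySem.List.mem_insertBy _ _ _ _).1 hy with rfl | hy
      · exact Or.inr (by simp)
      · exact Or.inl hy
    · exact Or.inr (by simp [hy])

-- sorted2 on pairs with pairwise-distinct first components is sorted by the first component.
theorem sorted2_eq_sorted_fst (xs : List (String × Int))
    (hnd : (xs.map (fun p => p.1)).Nodup) :
    PySem.List.sorted2 xs (fun p => p.1) (fun p => p.2)
    = PySem.List.sorted xs (fun p => p.1) := by
  rw [PySem.List.sorted_eq_foldl_insertBy]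
  simp only [PySem.List.sorted2]
  apply foldl_insertBy_eq
  intro x hx y hy
  rcases hy with hy | hy
  · simp at hy
  · by_cases hxy : x = y
    · subst hxy
      simp
    · have hfst : x.1 ≠ y.1 := by
        intro he
        exact hxy (List.inj_on_of_nodup_map hnd hx hy he)
      rcases lt_or_gt_of_ne hfst with hlt | hgt
      · simp [hlt, not_lt.2 (le_of_lt hlt)]
      · simp [hgt, not_lt.2 (le_of_lt hgt)]

theorem sum_bucket_counts_eq (language_buckets : List (String × List (String × Int))) :
    sum_bucket_counts language_buckets = sum_bucket_counts_alt language_buckets := by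
  unfold sum_bucket_counts sum_bucket_counts_alt
  simp only [acc_flatten]
  set ps := language_buckets.flatMap (fun kv => kv.2) with hps
  set f := fun totals (bc : String × Int) => PySem.Dict.insert totals bc.1 (totals.getD bc.1 0 + bc.2) with hf
  set totals := ps.foldl f PySem.Dict.empty with htot
  have hkeys : totals.keys = PySem.Set.ofList (ps.map (fun p => p.1)) := by
    rw [htot, hf]
    rw [PySem.Dict.keys_foldl_insert_key ps (fun p => p.1)
      (fun d p => d.getD p.1 0 + p.2) PySem.Dict.empty]
    rfl
  have hnd : totals.keys.Nodup := by
    rw [hkeys]; exact PySem.Set.nodup_ofList _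
  have hitems : totals.items
      = totals.keys.map (fun k => (k, totals.getD k 0)) :=
    PySem.Dict.items_eq_map_keys totals hnd 0
  have hval : ∀ k, totals.getD k 0
      = ((ps.filter (fun p => p.1 == k)).map (fun p => p.2)).sum := by
    intro k
    rw [htot, hf, getD_acc]
    simp
  set S := fun k => ((ps.filter (fun p => p.1 == k)).map (fun p => p.2)).sum with hS
  set names := PySem.List.sorted (PySem.Set.ofList (ps.map (fun p => p.1))) (fun k => k) with hnames
  have hitems' : totals.items = (PySem.Set.ofList (ps.map (fun p => p.1))).map (fun k => (k, S k)) := by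
    rw [hitems, hkeys]
    exact List.map_congr_left (fun k _ => by rw [hval k])
  have hperm : (names.map (fun k => (k, S k))).Perm totals.items := by
    rw [hitems']
    exact (PySem.List.sorted_perm _ _ _).map _
  have hpw : (names.map (fun k => (k, S k))).Pairwise
      (fun a b : String × Int => a.1 < b.1) := by
    rw [List.pairwise_map]
    exact PySem.List.sorted_ofList_pairwise_lt _
  have hndmap : ((names.map (fun k => (k, S k))).map (fun p => p.1)).Nodup := by
    rw [List.map_map]
    have : ((fun p : String × Int => p.1) ∘ (fun k => (k, S k))) = id := rfl
    rw [this, List.map_id]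
    exact (PySem.List.sorted_ofList_pairwise_lt _).nodup
  have hnditems : (totals.items.map (fun p => p.1)).Nodup := by
    have := (hperm.map (fun p : String × Int => p.1)).nodup_iff
    exact this.mp hndmap
  rw [sorted2_eq_sorted_fst totals.items hnditems]
  exact PySem.List.sorted_eq_of_perm_of_pairwise_lt _ _ _ hperm hpw

-- ===== VERDICT (by name: the statement is the Claim_ definition above) =====
theorem sum_bucket_counts_spec : Claim_equal_sum_bucket_counts := by
  intro language_buckets _
  unfold Spec_sum_bucket_counts
  exact sum_bucket_counts_eq language_buckets
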